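-- pv_equiv track=rewrite | github.com/ftyytf/telegram-hr-bot | handlers/tracker.py | parse_status_callback
-- ===== SOURCE A (Python) =====
-- CATEGORY_KEYS = ["sleep", "work", "growth", "sport", "finance", "no_chaos", "joy"]
--
-- def parse_status_callback(data: str):
--     """Парсит callback вида st_<category>_<status>.
--     Корректно обрабатывает категории с _ в имени (например no_chaos).
--     """
--     prefix = "st_"
--     raw = data[len(prefix):]  # убираем "st_"
--     for key in sorted(CATEGORY_KEYS, key=len, reverse=True):
--         if raw.startswith(key + "_"):
--             status = raw[len(key) + 1:]
--             return key, status
--     return None, None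
-- ===== SOURCE B (Python) =====
-- CATEGORY_KEYS = ["sleep", "work", "growth", "sport", "finance", "no_chaos", "joy"]
-- _CATEGORIES = set(CATEGORY_KEYS)
--
-- def parse_status_callback(data: str):
--     # Strip "st_" by position, then locate the category boundary with find():
--     # the category ends at the first "_", or (for the one two-word key) the second.
--     raw = data[3:]
--     first = raw.find("_")
--     if first == -1:
--         return None, None
--     if raw[:first] in _CATEGORIES:
--         return raw[:first], raw[first + 1:]
--     second = raw.find("_", first + 1)
--     if second != -1 and raw[:second] in _CATEGORIES:
--         return raw[:second], raw[second + 1:]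
--     return None, None
-- ===== Notes on version B (the rewrite author's own statement) =====
-- stated objective: idiomatic
-- what changed: Instead of scanning the length-sorted category list and testing raw.startswith(key + separator) for each key, B locates the category boundary directly with str.find (the first underscore, or the second one for the two-word key no_chaos) and checks the candidate prefix with a single set-membership test.
import Mathlib
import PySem

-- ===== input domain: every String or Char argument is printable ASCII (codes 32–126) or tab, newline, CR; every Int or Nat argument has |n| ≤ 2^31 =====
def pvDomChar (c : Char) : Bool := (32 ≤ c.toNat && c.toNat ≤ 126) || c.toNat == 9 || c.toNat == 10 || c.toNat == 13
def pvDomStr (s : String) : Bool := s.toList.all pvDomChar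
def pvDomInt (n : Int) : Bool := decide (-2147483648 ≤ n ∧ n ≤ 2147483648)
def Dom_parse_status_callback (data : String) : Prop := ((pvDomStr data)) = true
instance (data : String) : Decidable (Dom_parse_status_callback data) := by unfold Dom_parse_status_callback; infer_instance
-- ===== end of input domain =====

-- B replaces A's strip-prefix-then-scan-sorted-keys loop by locating the category boundary
-- with str.find (first or second "_") and one set-membership test (objective: idiomatic).

-- ===== PORT A =====
def pvCategoryKeys : List String := ["sleep", "work", "growth", "sport", "finance", "no_chaos", "joy"]

-- the 'for key in sorted(...)' loop; 'key + "_"' is built as String.ofList (toList-level append, exact)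
def pvScanA : List String → String → Option String × Option String
  | [], _ => (none, none)
  | key :: rest, raw =>
      if PySem.Str.startswith raw (String.ofList (key.toList ++ ['_'])) then
        (some key, some (PySem.Str.slice raw (some (PySem.Str.len key + 1)) none))
      else pvScanA rest raw

def parse_status_callback (data : String) : Option String × Option String :=
  let raw := PySem.Str.slice data (some (PySem.Str.len "st_")) none
  pvScanA (PySem.List.sorted pvCategoryKeys (fun k => PySem.Str.len k) true) raw

-- ===== PORT B =====
def pvCategorySet : PySem.Set String := PySem.Set.ofList pvCategoryKeys

-- body of Source B after 'raw = data[3:]'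
def pvAltCore (raw : String) : Option String × Option String :=
  let first := PySem.Str.find raw "_"
  if first == -1 then (none, none)
  else if PySem.Set.contains pvCategorySet (PySem.Str.slice raw none (some first)) then
    (some (PySem.Str.slice raw none (some first)), some (PySem.Str.slice raw (some (first + 1)) none))
  else
    let second := PySem.Str.findFrom raw "_" (first + 1) none
    if second != -1 && PySem.Set.contains pvCategorySet (PySem.Str.slice raw none (some second)) then
      (some (PySem.Str.slice raw none (some second)), some (PySem.Str.slice raw (some (second + 1)) none))
    else (none, none)

def parse_status_callback_alt (data : String) : Option String × Option String :=
  pvAltCore (PySem.Str.slice data (some 3) none)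

-- ===== PRECONDITION & SPEC =====
def Spec_parse_status_callback (data : String) (out : Option String × Option String) : Prop := out = parse_status_callback_alt data
instance (data : String) (out : Option String × Option String) : Decidable (Spec_parse_status_callback data out) := by unfold Spec_parse_status_callback; infer_instance

-- ===== CLAIM (what is proved, stated in full; the proofs are below) =====
def Claim_equal_parse_status_callback : Prop := ∀ (data : String), Dom_parse_status_callback data → Spec_parse_status_callback data (parse_status_callback data)

-- ===== LEMMAS AND PROOFS =====

-- a ++ '_' :: b is a prefix of t ++ '_' :: u (both heads underscore-free) iff a = t and b <+: u
theorem pvPrefUs : ∀ (a b t u : List Char), '_' ∉ a → '_' ∉ t →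
    (a ++ '_' :: b <+: t ++ '_' :: u ↔ a = t ∧ b <+: u)
  | [], _, [], _, _, _ => by simp [List.cons_prefix_iff]
  | [], b, y :: t', u, _, ht => by
      simp only [List.mem_cons, not_or] at ht
      constructor
      · intro h
        rw [List.nil_append, List.cons_append, List.cons_prefix_iff] at h
        obtain ⟨l', h1, -⟩ := h
        exact absurd (List.cons.inj h1).1.symm ht.1
      · rintro ⟨h, -⟩; cases h
  | x :: a', b, [], u, ha, _ => by
      simp only [List.mem_cons, not_or] at ha
      constructor
      · intro h
        rw [List.cons_append, List.nil_append, List.cons_prefix_iff] at h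
        obtain ⟨l', h1, -⟩ := h
        exact absurd (List.cons.inj h1).1 ha.1
      · rintro ⟨h, -⟩; cases h
  | x :: a', b, y :: t', u, ha, ht => by
      simp only [List.mem_cons, not_or] at ha ht
      have ih := pvPrefUs a' b t' u ha.2 ht.2
      rw [List.cons_append, List.cons_append, List.cons_prefix_iff]
      constructor
      · rintro ⟨l', h1, h2⟩
        obtain ⟨hxy, hl⟩ := List.cons.inj h1
        subst hl
        obtain ⟨h3, h4⟩ := ih.mp h2
        exact ⟨by rw [hxy, h3], h4⟩
      · rintro ⟨h, hb⟩
        obtain ⟨hxy, hat⟩ := List.cons.inj h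
        exact ⟨t' ++ '_' :: u, by rw [hxy], ih.mpr ⟨hat, hb⟩⟩

theorem pvEqUs (a b t u : List Char) (ha : '_' ∉ a) (ht : '_' ∉ t) :
    t ++ '_' :: u = a ++ '_' :: b ↔ t = a ∧ u = b := by
  constructor
  · intro h
    have h1 : a ++ '_' :: b <+: t ++ '_' :: u := h ▸ List.prefix_refl _
    have h2 : t ++ '_' :: u <+: a ++ '_' :: b := h ▸ List.prefix_refl _
    obtain ⟨hat, hbu⟩ := (pvPrefUs a b t u ha ht).mp h1
    obtain ⟨hta, hub⟩ := (pvPrefUs t u a b ht ha).mp h2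
    exact ⟨hat.symm, hub.eq_of_length (Nat.le_antisymm hub.length_le hbu.length_le)⟩
  · rintro ⟨h1, h2⟩; rw [h1, h2]

-- the first '_' of t ++ '_' :: u is at index t.length
theorem pvFindDecomp (t u : List Char) (ht : '_' ∉ t) :
    PySem.Chars.find (t ++ '_' :: u) ['_'] = (t.length : Int) := by
  have hin : ['_'] <:+: t ++ '_' :: u := ⟨t, u, by simp⟩
  have h0 : 0 ≤ PySem.Chars.find (t ++ '_' :: u) ['_'] :=
    (PySem.Chars.find_nonneg_iff _ _).mpr hin
  obtain ⟨h1, h2⟩ := PySem.Chars.find_spec h0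
  have hje : (PySem.Chars.find (t ++ '_' :: u) ['_']).toNat = t.length := by
    set j := (PySem.Chars.find (t ++ '_' :: u) ['_']).toNat with hj
    rcases lt_trichotomy j t.length with h | h | h
    · exfalso
      obtain ⟨l', heq, -⟩ := List.cons_prefix_iff.mp h1
      have hget : (t ++ '_' :: u)[j]? = some '_' := by
        rw [← List.head?_drop, heq]; rfl
      rw [List.getElem?_append_left h, List.getElem?_eq_getElem h] at hget
      exact ht (Option.some.inj hget ▸ List.getElem_mem h)
    · exact h
    · exact (h2 t.length h (by rw [List.drop_left]; exact ⟨u, rfl⟩)).elim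
  omega

-- a string containing '_' splits as t ++ '_' :: u with '_' ∉ t
theorem pvDecomp (cs : List Char) (h : '_' ∈ cs) :
    ∃ t u, cs = t ++ '_' :: u ∧ '_' ∉ t := by
  induction cs with
  | nil => simp at h
  | cons c cs ih =>
    by_cases hc : c = '_'
    · exact ⟨[], cs, by simp [hc], by simp⟩
    · have hm : '_' ∈ cs := by
        rcases List.mem_cons.mp h with h' | h'
        · exact absurd h'.symm hc
        · exact h'
      obtain ⟨t, u, he, hn⟩ := ih hm
      refine ⟨c :: t, u, by simp [he], ?_⟩
      simp only [List.mem_cons, not_or]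
      exact ⟨fun h' => hc h'.symm, hn⟩

theorem pvSortedKeys :
    PySem.List.sorted pvCategoryKeys (fun k => PySem.Str.len k) true
      = ["no_chaos", "finance", "growth", "sleep", "sport", "work", "joy"] := by decide

theorem pvMain (raw : String) (t u : List Char) (hcs : raw.toList = t ++ '_' :: u) (ht : '_' ∉ t) :
    pvScanA ["no_chaos", "finance", "growth", "sleep", "sport", "work", "joy"] raw = pvAltCore raw := by
  have hfind : PySem.Chars.find raw.toList ['_'] = (t.length : Int) := by
    rw [hcs]; exact pvFindDecomp t u ht
  have hsw : ∀ (a b : List Char), '_' ∉ a →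
      ((PySem.Chars.startswith raw.toList (a ++ '_' :: b) = true) ↔ (a = t ∧ b <+: u)) := by
    intro a b ha
    rw [PySem.Chars.startswith_iff, hcs]
    exact pvPrefUs a b t u ha ht
  have hhead : PySem.Str.slice raw none (some (t.length : Int)) = String.ofList t := by
    apply String.toList_inj.mp
    rw [PySem.Str.toList_slice, String.toList_ofList, PySem.Chars.slice_eq_listSlice,
      PySem.List.slice_to _ (Int.natCast_nonneg _), Int.toNat_natCast, hcs, List.take_left]
  have hKeys : pvCategorySet = ["sleep", "work", "growth", "sport", "finance", "no_chaos", "joy"] := by decide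
  have c_nc : PySem.Chars.startswith raw.toList ['n','o','_','c','h','a','o','s','_'] = true ↔
      (['n','o'] = t ∧ ['c','h','a','o','s','_'] <+: u) := hsw ['n','o'] ['c','h','a','o','s','_'] (by decide)
  have c_fi : PySem.Chars.startswith raw.toList ['f','i','n','a','n','c','e','_'] = true ↔
      (['f','i','n','a','n','c','e'] = t ∧ [] <+: u) := hsw ['f','i','n','a','n','c','e'] [] (by decide)
  have c_gr : PySem.Chars.startswith raw.toList ['g','r','o','w','t','h','_'] = true ↔
      (['g','r','o','w','t','h'] = t ∧ [] <+: u) := hsw ['g','r','o','w','t','h'] [] (by decide)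
  have c_sl : PySem.Chars.startswith raw.toList ['s','l','e','e','p','_'] = true ↔
      (['s','l','e','e','p'] = t ∧ [] <+: u) := hsw ['s','l','e','e','p'] [] (by decide)
  have c_sp : PySem.Chars.startswith raw.toList ['s','p','o','r','t','_'] = true ↔
      (['s','p','o','r','t'] = t ∧ [] <+: u) := hsw ['s','p','o','r','t'] [] (by decide)
  have c_wo : PySem.Chars.startswith raw.toList ['w','o','r','k','_'] = true ↔
      (['w','o','r','k'] = t ∧ [] <+: u) := hsw ['w','o','r','k'] [] (by decide)
  have c_jo : PySem.Chars.startswith raw.toList ['j','o','y','_'] = true ↔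
      (['j','o','y'] = t ∧ [] <+: u) := hsw ['j','o','y'] [] (by decide)
  simp [pvScanA, pvAltCore, hfind, hhead, hKeys, c_nc, c_fi, c_gr, c_sl, c_sp, c_wo, c_jo]
  by_cases h_sl : (['s','l','e','e','p'] : List Char) = t
  · subst h_sl
    simp [(by decide : String.ofList ['s','l','e','e','p'] = "sleep")]
  by_cases h_wo : (['w','o','r','k'] : List Char) = t
  · subst h_wo
    simp [(by decide : String.ofList ['w','o','r','k'] = "work")]
  by_cases h_gr : (['g','r','o','w','t','h'] : List Char) = t
  · subst h_gr
    simp [(by decide : String.ofList ['g','r','o','w','t','h'] = "growth")]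
  by_cases h_sp : (['s','p','o','r','t'] : List Char) = t
  · subst h_sp
    simp [(by decide : String.ofList ['s','p','o','r','t'] = "sport")]
  by_cases h_fi : (['f','i','n','a','n','c','e'] : List Char) = t
  · subst h_fi
    simp [(by decide : String.ofList ['f','i','n','a','n','c','e'] = "finance")]
  by_cases h_jo : (['j','o','y'] : List Char) = t
  · subst h_jo
    simp [(by decide : String.ofList ['j','o','y'] = "joy")]
  -- t is none of the six single-word keys
  have mkne : ∀ (l : List Char) (s : String), ¬ l = t → s.toList = l → String.ofList t ≠ s := by
    intro l s hne hs heq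
    apply hne
    have h2 := congrArg String.toList heq
    rw [String.toList_ofList, hs] at h2
    exact h2.symm
  have n_sl := mkne _ "sleep" h_sl (by decide)
  have n_wo := mkne _ "work" h_wo (by decide)
  have n_gr := mkne _ "growth" h_gr (by decide)
  have n_sp := mkne _ "sport" h_sp (by decide)
  have n_fi := mkne _ "finance" h_fi (by decide)
  have n_jo := mkne _ "joy" h_jo (by decide)
  have n_nc : String.ofList t ≠ "no_chaos" := by
    intro heq
    have h2 := congrArg String.toList heq
    rw [String.toList_ofList] at h2
    exact ht (by rw [h2]; decide)
  have hlen : t.length + 1 ≤ raw.toList.length := by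
    rw [hcs]; simp [List.length_append]
  have hdrop : raw.toList.drop (t.length + 1) = u := by
    rw [hcs, show t ++ '_' :: u = (t ++ ['_']) ++ u by simp,
      show t.length + 1 = (t ++ ['_']).length by simp, List.drop_left]
  have hFF : PySem.Chars.findFrom raw.toList ['_'] (↑t.length + 1) =
      if PySem.Chars.find u ['_'] = -1 then -1 else ((t.length + 1 : Nat) : Int) + PySem.Chars.find u ['_'] := by
    have h := PySem.Chars.findFrom_natCast raw.toList ['_'] (t.length + 1) hlen
    rw [show ((t.length + 1 : Nat) : Int) = ↑t.length + 1 by push_cast; ring] at h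
    rw [h, hdrop]
    push_cast
    ring_nf
  by_cases hu : '_' ∈ u
  · obtain ⟨v, w, huv, hv⟩ := pvDecomp u hu
    subst huv
    have hfu : PySem.Chars.find (v ++ '_' :: w) ['_'] = (v.length : Int) := pvFindDecomp v w hv
    have hsec : PySem.Chars.findFrom raw.toList ['_'] (↑t.length + 1) = (t.length : Int) + 1 + (v.length : Int) := by
      rw [hFF, hfu, if_neg (by omega)]
      push_cast
      ring
    have hhead2 : PySem.Str.slice raw none (some ((t.length : Int) + 1 + (v.length : Int))) = String.ofList (t ++ '_' :: v) := by
      apply String.toList_inj.mp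
      rw [show (t.length : Int) + 1 + (v.length : Int) = ((t.length + 1 + v.length : Nat) : Int) by push_cast; ring]
      rw [PySem.Str.toList_slice, String.toList_ofList, PySem.Chars.slice_eq_listSlice,
        PySem.List.slice_to _ (Int.natCast_nonneg _), Int.toNat_natCast, hcs, List.take_append,
        List.take_of_length_le (by omega)]
      congr 1
      rw [show t.length + 1 + v.length - t.length = v.length + 1 by omega, List.take_succ_cons, List.take_left]
    have hne2 : ¬((t.length : Int) + 1 + (v.length : Int) = -1) := by omega
    have m_ne : ∀ s : String, '_' ∉ s.toList → String.ofList (t ++ '_' :: v) ≠ s := by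
      intro s hns heq
      have h2 := congrArg String.toList heq
      rw [String.toList_ofList] at h2
      exact hns (by rw [← h2]; simp)
    have m_nc : String.ofList (t ++ '_' :: v) = "no_chaos" ↔ (t = ['n','o'] ∧ v = ['c','h','a','o','s']) := by
      constructor
      · intro heq
        have h2 := congrArg String.toList heq
        rw [String.toList_ofList] at h2
        have h3 : t ++ '_' :: v = ['n','o'] ++ '_' :: ['c','h','a','o','s'] := by rw [h2]; decide
        exact (pvEqUs ['n','o'] ['c','h','a','o','s'] t v (by decide) ht).mp h3
      · rintro ⟨h1, h2⟩
        rw [h1, h2]; decide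
    have c_pref : (['c','h','a','o','s','_'] <+: v ++ '_' :: w) ↔ (['c','h','a','o','s'] = v ∧ [] <+: w) :=
      pvPrefUs ['c','h','a','o','s'] [] v w (by decide) hv
    by_cases hnc : t = ['n','o'] ∧ v = ['c','h','a','o','s']
    · obtain ⟨h1, h2⟩ := hnc
      subst h1; subst h2
      simp only [List.length_cons, List.length_nil] at hsec hhead2
      norm_num at hsec hhead2
      simp [hsec, hhead2]
    · have hA : ¬ (['n','o'] = t ∧ ['c','h','a','o','s','_'] <+: v ++ '_' :: w) := by
        rintro ⟨hno, hp⟩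
        exact hnc ⟨hno.symm, ((c_pref.mp hp).1).symm⟩
      simp [hsec, hhead2, hne2, hA, h_sl, h_wo, h_gr, h_sp, h_fi, h_jo]
      have hm1 : ¬(String.ofList t = "sleep" ∨ String.ofList t = "work" ∨ String.ofList t = "growth" ∨
          String.ofList t = "sport" ∨ String.ofList t = "finance" ∨ String.ofList t = "no_chaos" ∨
          String.ofList t = "joy") := by
        simp [n_sl, n_wo, n_gr, n_sp, n_fi, n_jo, n_nc]
      have hm2 : ¬(String.ofList t ++ String.ofList ('_' :: v) = "sleep" ∨
          String.ofList t ++ String.ofList ('_' :: v) = "work" ∨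
          String.ofList t ++ String.ofList ('_' :: v) = "growth" ∨
          String.ofList t ++ String.ofList ('_' :: v) = "sport" ∨
          String.ofList t ++ String.ofList ('_' :: v) = "finance" ∨
          String.ofList t ++ String.ofList ('_' :: v) = "no_chaos" ∨
          String.ofList t ++ String.ofList ('_' :: v) = "joy") := by
        rw [show String.ofList t ++ String.ofList ('_' :: v) = String.ofList (t ++ '_' :: v) by simp]
        simp only [m_nc, not_or]
        exact ⟨m_ne _ (by decide), m_ne _ (by decide), m_ne _ (by decide), m_ne _ (by decide),
          m_ne _ (by decide), hnc, m_ne _ (by decide)⟩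
      rw [if_neg hm1, if_neg hm2]
  · have hfu : PySem.Chars.find u ['_'] = -1 :=
      (PySem.Chars.find_eq_neg_one_iff _ _).mpr (fun ⟨s1, s2, hst⟩ => hu (by rw [← hst]; simp))
    have hA : ¬ (['n','o'] = t ∧ ['c','h','a','o','s','_'] <+: u) := by
      rintro ⟨-, hp⟩
      exact hu (hp.subset (by decide))
    simp [hFF, hfu, hA, h_sl, h_wo, h_gr, h_sp, h_fi, h_jo, n_sl, n_wo, n_gr, n_sp, n_fi, n_jo, n_nc]

theorem pvNoUnderscore (raw : String) (h : '_' ∉ raw.toList) :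
    pvScanA ["no_chaos", "finance", "growth", "sleep", "sport", "work", "joy"] raw = pvAltCore raw := by
  have hsw : ∀ p : List Char, '_' ∈ p → PySem.Chars.startswith raw.toList p = false := by
    intro p hp
    rw [← Bool.not_eq_true, PySem.Chars.startswith_iff]
    exact fun hpre => h (hpre.subset hp)
  have hfind : PySem.Chars.find raw.toList ['_'] = -1 :=
    (PySem.Chars.find_eq_neg_one_iff _ _).mpr
      (fun ⟨s, t, hst⟩ => h (by rw [← hst]; simp))
  simp [pvScanA, pvAltCore, hsw, hfind]

-- ===== VERDICT (by name: the statement is the Claim_ definition above) =====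
theorem parse_status_callback_spec : Claim_equal_parse_status_callback := by
  intro data _
  unfold Spec_parse_status_callback parse_status_callback parse_status_callback_alt
  rw [pvSortedKeys]
  have h3 : PySem.Str.len "st_" = (3 : Int) := by decide
  rw [h3]
  by_cases hmem : '_' ∈ (PySem.Str.slice data (some 3) none).toList
  · obtain ⟨t, u, hcs, ht⟩ := pvDecomp _ hmem
    exact pvMain _ t u hcs ht
  · exact pvNoUnderscore _ hmem
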